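-- pv_equiv track=rewrite | github.com/pbprasad99/algorithmic_pareto | docs/resources/.meta/consecutive_sum_finder.py | find_consecutive_sum_subarray
-- ===== SOURCE A (Python) =====
-- def find_consecutive_sum_subarray(numbers, n, target_sum):
--     """
--     Find all consecutive subarrays of length n in the given list that sum to target_sum.
--
--     Args:
--         numbers: List of integers
--         n: Length of consecutive subarray
--         target_sum: Target sum to achieve
--
--     Returns:
--         List of lists, where each inner list is a subarray of n consecutive elements that sum to target_sum
--     """
--     result = []
--
--     # Check if the list is too short
--     if len(numbers) < n:
--         return result
--
--     # Use sliding window approach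
--     # First calculate the sum of the first window
--     current_sum = sum(numbers[:n])
--
--     # Check if the first window matches the target sum
--     if current_sum == target_sum:
--         result.append(numbers[:n])
--
--     # Slide the window through the rest of the array
--     for i in range(n, len(numbers)):
--         # Update the current sum by removing the element going out of the window
--         # and adding the new element coming into the window
--         current_sum = current_sum - numbers[i - n] + numbers[i]
--
--         # Check if the current window sum matches the target
--         if current_sum == target_sum:
--             result.append(numbers[i - n + 1:i + 1])
--
--     return result
-- ===== SOURCE B (Python) =====
-- def find_consecutive_sum_subarray(numbers, n, target_sum):
--     return [numbers[s:s + n] for s in range(len(numbers) - n + 1)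
--             if sum(numbers[s:s + n]) == target_sum]
-- ===== Notes on version B (the rewrite author's own statement) =====
-- stated objective: simpler
-- what changed: Replaced the sliding-window running-sum loop (special-cased first window plus incremental updates) with a single comprehension that sums each length-n slice directly over all start indices.
import Mathlib
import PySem

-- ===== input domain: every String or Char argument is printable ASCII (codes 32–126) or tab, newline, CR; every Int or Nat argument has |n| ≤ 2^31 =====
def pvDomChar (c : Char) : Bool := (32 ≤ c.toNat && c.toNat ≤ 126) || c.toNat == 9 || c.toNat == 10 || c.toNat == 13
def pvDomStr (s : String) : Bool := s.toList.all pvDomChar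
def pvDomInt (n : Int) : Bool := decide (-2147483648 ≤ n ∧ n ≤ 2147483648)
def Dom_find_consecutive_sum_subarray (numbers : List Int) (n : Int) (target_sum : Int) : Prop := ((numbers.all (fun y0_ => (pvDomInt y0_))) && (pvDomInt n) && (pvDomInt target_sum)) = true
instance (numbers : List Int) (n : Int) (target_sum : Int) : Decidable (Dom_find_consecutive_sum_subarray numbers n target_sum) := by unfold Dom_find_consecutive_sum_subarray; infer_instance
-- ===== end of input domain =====

-- B drops A's running-sum maintenance and sums each length-n window directly
-- over all start indices (simpler; not faster).

-- ===== PORT A =====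
-- one loop step of A's sliding window: state = Option (current_sum, result);
-- none marks the IndexError Python raises when numbers[i - n] is out of range
def pvStepA (numbers : List Int) (n : Int) (target_sum : Int)
    (st : Option (Int × List (List Int))) (i : Int) : Option (Int × List (List Int)) :=
  match st with
  | none => none
  | some (cur, res) =>
    match PySem.List.pyGet? numbers (i - n), PySem.List.pyGet? numbers i with
    | some a, some b =>
      let cur' := cur - a + b
      some (cur', if cur' = target_sum
        then res ++ [PySem.List.slice numbers (some (i - n + 1)) (some (i + 1))]
        else res)
    | _, _ => none

def find_consecutive_sum_subarray (numbers : List Int) (n : Int) (target_sum : Int) : List (List Int) :=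
  if (numbers.length : Int) < n then []
  else
    let first := PySem.List.slice numbers none (some n)
    let cur0 := first.sum
    let res0 := if cur0 = target_sum then [first] else []
    match (PySem.List.pyRange n (numbers.length : Int)).foldl
        (pvStepA numbers n target_sum) (some (cur0, res0)) with
    | some (_, res) => res
    | none => []

-- ===== PORT B =====
def find_consecutive_sum_subarray_alt (numbers : List Int) (n : Int) (target_sum : Int) : List (List Int) :=
  (PySem.List.pyRange 0 ((numbers.length : Int) - n + 1)).foldl
    (fun acc s =>
      if (PySem.List.slice numbers (some s) (some (s + n))).sum = target_sum
      then acc ++ [PySem.List.slice numbers (some s) (some (s + n))]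
      else acc) []

-- ===== PRECONDITION & SPEC =====
-- Pre_ excludes n < 0, on which A always raises IndexError (numbers[i - n] with
-- i ranging over range(n, len(numbers)) steps past the end of the list).
def Pre_find_consecutive_sum_subarray (numbers : List Int) (n : Int) (target_sum : Int) : Prop := 0 ≤ n
instance (numbers : List Int) (n : Int) (target_sum : Int) : Decidable (Pre_find_consecutive_sum_subarray numbers n target_sum) := by unfold Pre_find_consecutive_sum_subarray; infer_instance
def pvWitness_find_consecutive_sum_subarray : List Int × Int × Int := ([1, 2, 3, 4], 2, 5)

def Spec_find_consecutive_sum_subarray (numbers : List Int) (n : Int) (target_sum : Int) (out : List (List Int)) : Prop := out = find_consecutive_sum_subarray_alt numbers n target_sum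
instance (numbers : List Int) (n : Int) (target_sum : Int) (out : List (List Int)) : Decidable (Spec_find_consecutive_sum_subarray numbers n target_sum out) := by unfold Spec_find_consecutive_sum_subarray; infer_instance

-- ===== CLAIM (what is proved, stated in full; the proofs are below) =====
def Claim_equal_find_consecutive_sum_subarray : Prop := ∀ (numbers : List Int) (n : Int) (target_sum : Int), Dom_find_consecutive_sum_subarray numbers n target_sum → Pre_find_consecutive_sum_subarray numbers n target_sum → Spec_find_consecutive_sum_subarray numbers n target_sum (find_consecutive_sum_subarray numbers n target_sum)

-- ===== LEMMAS AND PROOFS =====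

-- pyRange over natural bounds is a mapped List.range'
lemma pyRange_natCast_natCast (a : Nat) : ∀ (len : Nat),
    PySem.List.pyRange (a : Int) ((a + len : Nat) : Int)
      = (List.range' a len).map (fun k : Nat => (k : Int)) := by
  intro len
  induction len with
  | zero => simp [PySem.List.pyRange_one_eq_nil, List.range']
  | succ l ih =>
      have h1 : ((a + (l + 1) : Nat) : Int) = ((a + l : Nat) : Int) + 1 := by push_cast; ring
      have h2 : (a : Int) ≤ ((a + l : Nat) : Int) := by push_cast; omega
      rw [h1, PySem.List.pyRange_one_succ_right h2, ih, List.range'_concat]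
      simp

-- sliding one step: sum of the next window from the previous one
lemma win_shift (xs : List Int) (m j : Nat) (h : j + m < xs.length) :
    ((xs.drop (j+1)).take m).sum = ((xs.drop j).take m).sum - xs[j]'(by omega) + xs[j+m]'h := by
  cases m with
  | zero => simp
  | succ mm =>
      have hj : j < xs.length := by omega
      have hdj : xs[j]'hj :: xs.drop (j+1) = xs.drop j := List.getElem_cons_drop hj
      have hL : (xs.drop (j+1)).take (mm+1) = (xs.drop (j+1)).take mm ++ ((xs.drop (j+1))[mm]?).toList :=
        List.take_add_one
      have hg : (xs.drop (j+1))[mm]? = some (xs[j+1+mm]'(by omega)) := by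
        rw [List.getElem?_drop]
        exact List.getElem?_eq_getElem (by omega)
      have hR : (xs.drop j).take (mm+1) = xs[j]'hj :: (xs.drop (j+1)).take mm := by
        rw [← hdj, List.take_succ_cons]
      have hidx : xs[j+(mm+1)]'h = xs[j+1+mm]'(by omega) := by congr 1; omega
      rw [hL, hg, hR, hidx]
      simp

-- A's loop, characterised: starting at window j with k iterations left
lemma A_loop (xs : List Int) (m : Nat) (t : Int) :
    ∀ (k j : Nat) (acc : List (List Int)), j + m + k = xs.length →
    List.foldl (pvStepA xs (m : Int) t) (some (((xs.drop j).take m).sum, acc))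
        ((List.range' (m+j) k).map (fun x : Nat => (x : Int)))
      = some (((xs.drop (j+k)).take m).sum,
          acc ++ ((List.range' (j+1) k).filter
              (fun s => decide (((xs.drop s).take m).sum = t))).map
            (fun s => (xs.drop s).take m)) := by
  intro k
  induction k with
  | zero => intro j acc _; rw [List.range'_zero, List.range'_zero]; simp
  | succ l ih =>
      intro j acc hlen
      have hj : j < xs.length := by omega
      have hjm : j + m < xs.length := by omega
      rw [List.range'_succ]
      simp only [List.map_cons, List.foldl_cons]
      have e1 : ((m + j : Nat) : Int) - (m : Int) = ((j : Nat) : Int) := by push_cast; ring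
      have e2 : ((m + j : Nat) : Int) - (m : Int) + 1 = ((j + 1 : Nat) : Int) := by push_cast; ring
      have e3 : ((m + j : Nat) : Int) + 1 = ((m + j + 1 : Nat) : Int) := by push_cast; ring
      have hstep : pvStepA xs (m : Int) t (some (((xs.drop j).take m).sum, acc)) ((m + j : Nat) : Int)
          = some (((xs.drop (j+1)).take m).sum,
              if ((xs.drop (j+1)).take m).sum = t
              then acc ++ [(xs.drop (j+1)).take m] else acc) := by
        have g1 : PySem.List.pyGet? xs (((m + j : Nat) : Int) - (m : Int)) = some (xs[j]'hj) := by
          rw [e1, PySem.List.pyGet?_natCast]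
          exact List.getElem?_eq_getElem hj
        have g2 : PySem.List.pyGet? xs ((m + j : Nat) : Int) = some (xs[j+m]'hjm) := by
          rw [PySem.List.pyGet?_natCast]
          have : m + j = j + m := by omega
          rw [this]
          exact List.getElem?_eq_getElem hjm
        have hslice : PySem.List.slice xs (some (((m + j : Nat) : Int) - (m : Int) + 1))
            (some (((m + j : Nat) : Int) + 1)) = (xs.drop (j+1)).take m := by
          rw [e2, e3, PySem.List.slice_toNat xs (by omega) (by omega)]
          congr 1
          · omega
        have hcur : ((xs.drop j).take m).sum - xs[j]'hj + xs[j+m]'hjm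
            = ((xs.drop (j+1)).take m).sum := (win_shift xs m j hjm).symm
        simp only [pvStepA, g1, g2, hslice, hcur]
      have harr : m + j + 1 = m + (j + 1) := by omega
      rw [hstep, harr, ih (j+1) _ (by omega)]
      have hd : j + 1 + l = j + (l + 1) := by omega
      rw [hd, List.range'_succ, List.filter_cons]
      by_cases hc : ((xs.drop (j+1)).take m).sum = t
      · simp [hc, List.append_assoc]
      · simp [hc]

-- ===== VERDICT (by name: the statement is the Claim_ definition above) =====
theorem find_consecutive_sum_subarray_spec : Claim_equal_find_consecutive_sum_subarray := by
  intro numbers n target_sum _ hpre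
  unfold Spec_find_consecutive_sum_subarray
  obtain ⟨m, rfl⟩ : ∃ m : Nat, n = (m : Int) := ⟨n.toNat, (Int.toNat_of_nonneg hpre).symm⟩
  set N := numbers.length with hN
  by_cases hlt : N < m
  · -- list too short: both sides empty
    have hA : find_consecutive_sum_subarray numbers (m : Int) target_sum = [] := by
      unfold find_consecutive_sum_subarray
      rw [if_pos (by exact_mod_cast hlt)]
    have hB : find_consecutive_sum_subarray_alt numbers (m : Int) target_sum = [] := by
      unfold find_consecutive_sum_subarray_alt
      rw [PySem.List.pyRange_one_eq_nil (by push_cast; omega)]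
      simp
    rw [hA, hB]
  · have hm : m ≤ N := by omega
    -- normalise B to a filter/map over start indices 0 .. N-m
    have hBrange : (N : Int) - (m : Int) + 1 = ((N - m + 1 : Nat) : Int) := by push_cast [hm]; ring
    have hB : find_consecutive_sum_subarray_alt numbers (m : Int) target_sum
        = ((List.range' 0 (N - m + 1)).filter
              (fun s => decide (((numbers.drop s).take m).sum = target_sum))).map
            (fun s => (numbers.drop s).take m) := by
      unfold find_consecutive_sum_subarray_alt
      rw [← hN, hBrange, PySem.List.pyRange_zero_natCast, List.foldl_map]
      have hfun : (fun (acc : List (List Int)) (s : Nat) =>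
            if (PySem.List.slice numbers (some (s : Int)) (some ((s : Int) + (m : Int)))).sum = target_sum
            then acc ++ [PySem.List.slice numbers (some (s : Int)) (some ((s : Int) + (m : Int)))]
            else acc)
          = (fun (acc : List (List Int)) (s : Nat) =>
            if decide (((numbers.drop s).take m).sum = target_sum) = true
            then acc ++ [(numbers.drop s).take m] else acc) := by
        funext acc s
        have hs : PySem.List.slice numbers (some (s : Int)) (some ((s : Int) + (m : Int)))
            = (numbers.drop s).take m := by
          rw [PySem.List.slice_toNat numbers (by omega) (by omega)]
          congr 1
          · omega
        rw [hs]
        simp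
      rw [hfun, PySem.List.foldl_append_if, ← List.range_eq_range', List.nil_append]
    -- normalise A via the loop characterisation
    have hA : find_consecutive_sum_subarray numbers (m : Int) target_sum
        = (if (numbers.take m).sum = target_sum then [numbers.take m] else [])
          ++ ((List.range' 1 (N - m)).filter
              (fun s => decide (((numbers.drop s).take m).sum = target_sum))).map
            (fun s => (numbers.drop s).take m) := by
      unfold find_consecutive_sum_subarray
      rw [if_neg (by exact_mod_cast not_lt.mpr hm)]
      dsimp only
      have hfirst : PySem.List.slice numbers none (some (m : Int)) = numbers.take m := by
        rw [PySem.List.slice_to numbers (by omega)]; simp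
      rw [hfirst, ← hN]
      have hcast : (N : Int) = ((m + (N - m) : Nat) : Int) := by push_cast; omega
      rw [hcast, pyRange_natCast_natCast m (N - m)]
      have := A_loop numbers m target_sum (N - m) 0
        (if (numbers.take m).sum = target_sum then [numbers.take m] else []) (by omega)
      simp only [List.drop_zero, Nat.add_zero, Nat.zero_add] at this
      rw [this]
    rw [hA, hB]
    have hr : List.range' 0 (N - m + 1) = 0 :: List.range' 1 (N - m) := List.range'_succ
    rw [hr, List.filter_cons]
    simp only [List.drop_zero]
    by_cases hc : (numbers.take m).sum = target_sum
    · simp [hc]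
    · simp [hc]
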